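-- pv_equiv track=rewrite | github.com/nielsdenissen/decipher-capstone | code/decipher/possibility_generator.py | _get_key_for_word
-- ===== SOURCE A (Python) =====
-- from collections import Counter
--
-- def _get_key_for_word(word):
--     # Determine duplicates
--     duplicate_indices = []
--     for letter, letter_count in Counter(word).items():
--         if letter_count > 1:
--             indices = []
--             # Find indices of letter
--             from_index = 0
--             while len(indices) < letter_count:
--                 new_index = word.index(letter, from_index)
--                 indices.append(new_index)
--                 from_index = new_index + 1
--
--             # Add to duplicate indices list
--             duplicate_indices.append(tuple(indices))
--     duplicate_indices = tuple(sorted(duplicate_indices))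
--
--     return len(word), len(Counter(word)), duplicate_indices
-- ===== SOURCE B (Python) =====
-- def _get_key_for_word(word):
--     # One pass: group the indices of each letter (dict keeps first-occurrence order).
--     groups = {}
--     for i, ch in enumerate(word):
--         groups.setdefault(ch, []).append(i)
--     duplicates = sorted(tuple(g) for g in groups.values() if len(g) > 1)
--     return len(word), len(groups), tuple(duplicates)
-- ===== Notes on version B (the rewrite author's own statement) =====
-- stated objective: faster
-- what changed: Replaces Counter plus a per-letter while-loop of repeated str.index scans with a single enumerate pass that groups each letter's indices in a dict, then filters and sorts the groups.
import Mathlib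
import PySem

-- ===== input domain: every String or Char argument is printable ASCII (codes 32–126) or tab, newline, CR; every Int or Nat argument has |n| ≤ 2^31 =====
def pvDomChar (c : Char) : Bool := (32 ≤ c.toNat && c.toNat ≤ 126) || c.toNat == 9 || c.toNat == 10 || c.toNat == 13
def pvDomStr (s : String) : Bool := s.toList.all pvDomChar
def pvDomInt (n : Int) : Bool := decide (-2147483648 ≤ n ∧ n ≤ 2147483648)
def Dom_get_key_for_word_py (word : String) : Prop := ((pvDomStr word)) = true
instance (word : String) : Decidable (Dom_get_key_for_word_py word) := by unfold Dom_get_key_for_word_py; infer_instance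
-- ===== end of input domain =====

-- B replaces A's Counter + repeated str.index scans with one enumerate pass that
-- groups each letter's indices (objective: faster by a constant factor; same results).

-- ===== PORT A =====
-- the 'while len(indices) < letter_count' loop: each iteration appends exactly one index,
-- so it runs exactly letter_count times (fuel = letter_count).  word.index(letter, from_index)
-- is PySem.Chars.findFrom; the ValueError branch is unreachable here (there are always
-- letter_count occurrences), so findFrom's -1 is never produced.
def pyWordIndexLoop (cs : List Char) (letter : Char) : Nat → Int → List Int → List Int
  | 0, _, acc => acc
  | fuel + 1, fromIdx, acc =>
      let newIdx := PySem.Chars.findFrom cs [letter] fromIdx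
      pyWordIndexLoop cs letter fuel (newIdx + 1) (acc ++ [newIdx])

def get_key_for_word_py (word : String) : Int × Int × List (List Int) :=
  let cs := word.toList
  let counts := PySem.Dict.counter cs
  let duplicate_indices :=
    counts.items.foldl (fun acc p =>
      if p.2 > 1 then acc ++ [pyWordIndexLoop cs p.1 p.2.toNat 0 []] else acc) []
  (PySem.Str.len word, (counts.size : Int),
    PySem.List.sorted duplicate_indices (fun l => l) false)

-- ===== PORT B =====
def get_key_for_word_py_alt (word : String) : Int × Int × List (List Int) :=
  let cs := word.toList
  let groups : PySem.Dict Char (List Int) :=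
    (PySem.List.enumerate cs).foldl (fun d p => d.modify p.2 [] (fun l => l ++ [p.1])) PySem.Dict.empty
  let duplicates := (groups.values).filter (fun g => g.length > 1)
  (PySem.Str.len word, (groups.size : Int),
    PySem.List.sorted duplicates (fun l => l) false)

-- ===== PRECONDITION & SPEC =====
def Spec_get_key_for_word_py (word : String) (out : Int × Int × List (List Int)) : Prop := out = get_key_for_word_py_alt word
instance (word : String) (out : Int × Int × List (List Int)) : Decidable (Spec_get_key_for_word_py word out) := by unfold Spec_get_key_for_word_py; infer_instance

-- ===== CLAIM (what is proved, stated in full; the proofs are below) =====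
def Claim_equal_get_key_for_word_py : Prop := ∀ (word : String), Dom_get_key_for_word_py word → Spec_get_key_for_word_py word (get_key_for_word_py word)

-- ===== LEMMAS AND PROOFS =====

-- the ascending indices (as Ints) of letter c in a list, offset k
def occFrom : List Char → Char → Nat → List Int
  | [], _, _ => []
  | x :: t, c, k => if x = c then (k : Int) :: occFrom t c (k + 1) else occFrom t c (k + 1)

theorem length_occFrom (l : List Char) (c : Char) : ∀ k, (occFrom l c k).length = l.count c := by
  induction l with
  | nil => intro k; simp [occFrom]
  | cons x t ih =>
      intro k
      by_cases h : x = c <;> simp [occFrom, h, ih]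

theorem singleton_infix_iff (c : Char) (l : List Char) : [c] <:+: l ↔ c ∈ l := by
  constructor
  · intro h; exact h.subset (List.mem_singleton_self c)
  · intro h
    obtain ⟨s, t, rfl⟩ := List.append_of_mem h
    exact ⟨s, t, by simp⟩

theorem singleton_prefix_iff (c : Char) (l : List Char) : [c] <+: l ↔ l.head? = some c := by
  constructor
  · rintro ⟨t, rfl⟩; rfl
  · intro h
    cases l with
    | nil => simp at h
    | cons x t => simp at h; exact ⟨t, by simp [h]⟩

theorem findFrom_at (cs : List Char) (c : Char) (k : Nat) (hk : k < cs.length)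
    (he : cs[k] = c) : PySem.Chars.findFrom cs [c] (k : Int) = (k : Int) := by
  have hpre : [c] <+: cs.drop k := by
    rw [singleton_prefix_iff, List.head?_drop, List.getElem?_eq_getElem hk, he]
  have hne : PySem.Chars.findFrom cs [c] (k : Int) ≠ -1 := by
    rw [ne_eq, PySem.Chars.findFrom_natCast_eq_neg_one_iff cs [c] k (le_of_lt hk)]
    simp only [not_not]
    exact hpre.isInfix
  obtain ⟨h1, h2, h3⟩ := PySem.Chars.findFrom_natCast_spec cs [c] k (le_of_lt hk) hne
  by_contra hc
  have hgt : k < (PySem.Chars.findFrom cs [c] (k : Int)).toNat := by omega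
  exact h3 k (le_refl k) hgt hpre

theorem findFrom_ne (cs : List Char) (c : Char) (k : Nat) (hk : k < cs.length)
    (hne : cs[k] ≠ c) :
    PySem.Chars.findFrom cs [c] (k : Int) = PySem.Chars.findFrom cs [c] ((k + 1 : Nat) : Int) := by
  have hk' : k ≤ cs.length := le_of_lt hk
  have hk1 : k + 1 ≤ cs.length := hk
  have hdrop : cs.drop k = cs[k] :: cs.drop (k + 1) := List.drop_eq_getElem_cons hk
  have hmemiff : c ∈ cs.drop k ↔ c ∈ cs.drop (k + 1) := by
    rw [hdrop]
    constructor
    · intro h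
      rcases List.mem_cons.mp h with h | h
      · exact absurd h.symm hne
      · exact h
    · exact fun h => List.mem_cons.mpr (Or.inr h)
  by_cases hm : c ∈ cs.drop (k + 1)
  · have hne0 : PySem.Chars.findFrom cs [c] (k : Int) ≠ -1 := by
      rw [ne_eq, PySem.Chars.findFrom_natCast_eq_neg_one_iff cs [c] k hk']
      simp only [not_not]; rw [singleton_infix_iff]; exact hmemiff.mpr hm
    have hne1 : PySem.Chars.findFrom cs [c] ((k + 1 : Nat) : Int) ≠ -1 := by
      rw [ne_eq, PySem.Chars.findFrom_natCast_eq_neg_one_iff cs [c] (k + 1) hk1]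
      simp only [not_not]; rw [singleton_infix_iff]; exact hm
    obtain ⟨a1, a2, a3⟩ := PySem.Chars.findFrom_natCast_spec cs [c] k hk' hne0
    obtain ⟨b1, b2, b3⟩ := PySem.Chars.findFrom_natCast_spec cs [c] (k + 1) hk1 hne1
    set r := PySem.Chars.findFrom cs [c] (k : Int) with hr
    set r' := PySem.Chars.findFrom cs [c] ((k + 1 : Nat) : Int) with hr'
    have hrk : r.toNat ≠ k := by
      intro h
      have := singleton_prefix_iff c (cs.drop r.toNat) |>.mp a2
      rw [h, List.head?_drop, List.getElem?_eq_getElem hk] at this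
      exact hne (Option.some_injective _ this)
    have hrge : k + 1 ≤ r.toNat := by omega
    have h1 : ¬ r.toNat < r'.toNat := fun h => b3 r.toNat hrge h a2
    have h2 : ¬ r'.toNat < r.toNat := fun h => a3 r'.toNat (by omega) h b2
    omega
  · have hm0 : ¬ c ∈ cs.drop k := fun h => hm (hmemiff.mp h)
    have e0 : PySem.Chars.findFrom cs [c] (k : Int) = -1 := by
      rw [PySem.Chars.findFrom_natCast_eq_neg_one_iff cs [c] k hk', singleton_infix_iff]
      exact hm0
    have e1 : PySem.Chars.findFrom cs [c] ((k + 1 : Nat) : Int) = -1 := by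
      rw [PySem.Chars.findFrom_natCast_eq_neg_one_iff cs [c] (k + 1) hk1, singleton_infix_iff]
      exact hm
    rw [e0, e1]

theorem loop_shift (cs : List Char) (c : Char) (k : Nat) (hk : k < cs.length)
    (hne : cs[k] ≠ c) (n : Nat) (acc : List Int) :
    pyWordIndexLoop cs c n (k : Int) acc = pyWordIndexLoop cs c n ((k + 1 : Nat) : Int) acc := by
  cases n with
  | zero => rfl
  | succ m => simp only [pyWordIndexLoop, findFrom_ne cs c k hk hne]

theorem loop_eq (cs : List Char) (c : Char) :
    ∀ m k acc, k ≤ cs.length → m = cs.length - k →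
      pyWordIndexLoop cs c ((cs.drop k).count c) (k : Int) acc = acc ++ occFrom (cs.drop k) c k := by
  intro m
  induction m with
  | zero =>
      intro k acc hk hm
      have : k = cs.length := by omega
      subst this
      simp [List.drop_length, occFrom, pyWordIndexLoop]
  | succ m ih =>
      intro k acc hk hm
      have hklt : k < cs.length := by omega
      have hdrop : cs.drop k = cs[k] :: cs.drop (k + 1) := List.drop_eq_getElem_cons hklt
      by_cases he : cs[k] = c
      · have hcount : (cs.drop k).count c = (cs.drop (k + 1)).count c + 1 := by
          rw [hdrop, List.count_cons, he]; simp
        rw [hcount]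
        simp only [pyWordIndexLoop, findFrom_at cs c k hklt he]
        have hcast : (k : Int) + 1 = ((k + 1 : Nat) : Int) := by push_cast; ring
        rw [hcast, ih (k + 1) (acc ++ [(k : Int)]) hklt (by omega)]
        rw [hdrop]
        simp [occFrom, he]
      · have hcount : (cs.drop k).count c = (cs.drop (k + 1)).count c := by
          rw [hdrop, List.count_cons]; simp [he]
        rw [hcount, loop_shift cs c k hklt he, ih (k + 1) acc hklt (by omega)]
        rw [hdrop]
        simp [occFrom, he]

theorem occI_eq (c : Char) : ∀ (l : List Char) (k : Nat),
    ((PySem.List.enumerate l (k : Int)).filter (fun p => p.2 == c)).map (fun p => p.1) = occFrom l c k := by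
  intro l
  induction l with
  | nil => intro k; simp [occFrom]
  | cons x t ih =>
      intro k
      rw [PySem.List.enumerate_cons]
      have hcast : (k : Int) + 1 = ((k + 1 : Nat) : Int) := by push_cast; ring
      rw [hcast]
      by_cases h : x = c
      · simp only [List.filter_cons]
        rw [if_pos (by simp [h]), List.map_cons, ih (k + 1)]
        simp [occFrom, h]
      · simp only [List.filter_cons]
        rw [if_neg (by simp [h]), ih (k + 1)]
        simp [occFrom, h]

theorem get_key_for_word_py_main (word : String) :
    get_key_for_word_py word = get_key_for_word_py_alt word := by
  unfold get_key_for_word_py get_key_for_word_py_alt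
  dsimp only
  set cs := word.toList with hcs
  -- B's groups dict, as a fold over (letter, index) pairs
  set l' : List (Char × Int) := (PySem.List.enumerate cs).map (fun p => (p.2, p.1)) with hl'
  have hfold : (PySem.List.enumerate cs).foldl
      (fun d (p : Int × Char) => d.modify p.2 [] (fun l => l ++ [p.1])) PySem.Dict.empty
      = l'.foldl (fun d (p : Char × Int) => d.modify p.1 [] (fun l => l ++ [p.2])) PySem.Dict.empty := by
    rw [hl', List.foldl_map]
  rw [hfold]
  set groups := l'.foldl (fun d (p : Char × Int) => d.modify p.1 [] (fun l => l ++ [p.2]))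
      PySem.Dict.empty with hgroups
  have hkeys : groups.keys = PySem.Set.ofList cs := by
    rw [hgroups,
      PySem.Dict.keys_foldl_modify_key l' (fun p => p.1) [] (fun _ p => fun l => l ++ [p.2])]
    rw [hl', List.map_map]
    have : ((fun p : Char × Int => p.1) ∘ fun p : Int × Char => (p.2, p.1)) = (fun p => p.2) := rfl
    rw [this, PySem.List.map_snd_enumerate]
    simp [PySem.Set.update, PySem.Set.ofList_eq_foldl, PySem.Dict.keys_empty]
  have hnodup : groups.keys.Nodup := by
    rw [hgroups]
    exact PySem.Dict.nodup_keys_foldl_modify_key l' (fun p => p.1) [] (fun _ p => fun l => l ++ [p.2])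
      PySem.Dict.empty (by simp [PySem.Dict.keys_empty])
  have hgetD : ∀ c : Char, groups.getD c [] = occFrom cs c 0 := by
    intro c
    rw [hgroups, PySem.Dict.getD_foldl_modify_append l' PySem.Dict.empty c,
      PySem.Dict.getD_empty, List.nil_append, hl', List.filter_map, List.map_map]
    have h1 : ((fun p : Char × Int => p.1 == c) ∘ fun p : Int × Char => (p.2, p.1))
        = (fun p : Int × Char => p.2 == c) := rfl
    have h2 : ((fun p : Char × Int => p.2) ∘ fun p : Int × Char => (p.2, p.1))
        = (fun p : Int × Char => p.1) := rfl
    rw [h1, h2]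
    have := occI_eq c cs 0
    simpa using this
  have hvalues : groups.values = groups.keys.map (fun k => groups.getD k []) :=
    PySem.Dict.values_eq_map_keys groups hnodup []
  -- sizes agree: both are the number of distinct letters
  have hsizeB : groups.size = (PySem.Set.ofList cs).length := by
    have : groups.size = groups.keys.length := by
      simp [PySem.Dict.size, PySem.Dict.keys]
    rw [this, hkeys]
  have hsizeA : (PySem.Dict.counter cs).size = (PySem.Set.ofList cs).length := by
    have : (PySem.Dict.counter cs).size = (PySem.Dict.counter cs).keys.length := by
      simp [PySem.Dict.size, PySem.Dict.keys]
    rw [this, PySem.Dict.keys_counter]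
  -- A's duplicate lists, before sorting
  have hloop : ∀ c : Char, pyWordIndexLoop cs c (cs.count c) 0 [] = occFrom cs c 0 := by
    intro c
    have := loop_eq cs c cs.length 0 [] (Nat.zero_le _) (by omega)
    simpa [List.drop_zero] using this
  have hA : (PySem.Dict.counter cs).items.foldl (fun acc p =>
        if p.2 > 1 then acc ++ [pyWordIndexLoop cs p.1 p.2.toNat 0 []] else acc) []
      = ((PySem.Set.ofList cs).filter (fun c => decide (1 < cs.count c))).map
          (fun c => occFrom cs c 0) := by
    rw [PySem.List.foldl_append_ite (fun p : Char × Int => p.2 > 1)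
      (fun p => pyWordIndexLoop cs p.1 p.2.toNat 0 []), List.nil_append,
      PySem.Dict.items_counter, List.filter_map, List.map_map]
    have h1 : ∀ x ∈ PySem.Set.ofList cs,
        ((fun p : Char × Int => decide (p.2 > 1)) ∘ fun k => (k, (cs.count k : Int))) x
        = (fun c => decide (1 < cs.count c)) x := by
      intro x _
      simp only [Function.comp_apply, decide_eq_decide]
      exact_mod_cast Iff.rfl
    rw [List.filter_congr h1]
    refine List.map_congr_left ?_
    intro x _
    simp only [Function.comp_apply, Int.toNat_natCast]
    exact hloop x
  have hB : groups.values.filter (fun g => g.length > 1)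
      = ((PySem.Set.ofList cs).filter (fun c => decide (1 < cs.count c))).map
          (fun c => occFrom cs c 0) := by
    rw [hvalues, hkeys, List.filter_map]
    have h1 : ∀ x ∈ PySem.Set.ofList cs,
        ((fun g : List Int => decide (g.length > 1)) ∘ fun k => groups.getD k []) x
        = (fun c => decide (1 < cs.count c)) x := by
      intro x _
      simp only [Function.comp_apply, hgetD x, length_occFrom]
    rw [List.filter_congr h1]
    refine List.map_congr_left ?_
    intro x _
    exact hgetD x
  rw [hA, hB, hsizeA, hsizeB]

-- ===== VERDICT (by name: the statement is the Claim_ definition above) =====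
theorem get_key_for_word_py_spec : Claim_equal_get_key_for_word_py := by
  intro word _
  unfold Spec_get_key_for_word_py
  exact get_key_for_word_py_main word
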